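-- pv_equiv track=rewrite | github.com/ctrl-alt-d/ExportFpUf | stuf/exportaMdUtils.py | fixaBlocs
-- ===== SOURCE A (Python) =====
-- def fixaBlocs(md):
--     """
--     Converteix els blocs que comencen per ::: amb blocs que comencen per ```
--     """
--     new_md = []
--     md = md.replace("\r\n", "\n")
--     md_splitted = md.split("\n")
--     target_pattern = "    :::"
--     keep_block_pattern = "    "
--     in_block = False
--     for line in md_splitted:
--         previous_in_block = in_block
--         in_block = in_block or line.startswith(target_pattern)
--         in_block = in_block and line.startswith(keep_block_pattern)
--
--         #
--         starting_block = in_block and not previous_in_block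
--         if starting_block:
--             cooked_line = line[len(target_pattern):]
--             new_md.append(f"```{cooked_line}")
--
--         #
--         keeping_in_block = in_block and previous_in_block
--         if keeping_in_block:
--             cooked_line = line[len(keep_block_pattern):]
--             new_md.append(cooked_line)
--
--         #
--         exiting_block = previous_in_block and not in_block
--         if exiting_block:
--             new_md.append("```")
--
--         #
--         if not in_block:
--             new_md.append(line)
--
--     if in_block:
--         new_md.append("```")
--
--     return "\r\n".join(new_md) + "\r\n"
-- ===== SOURCE B (Python) =====
-- def fixaBlocs(md):
--     """
--     Converteix els blocs que comencen per ::: amb blocs que comencen per ```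
--     """
--     lines = md.replace("\r\n", "\n").split("\n")
--     out = []
--     i = 0
--     n = len(lines)
--     while i < n:
--         line = lines[i]
--         if line.startswith("    :::"):
--             out.append("```" + line[7:])
--             i += 1
--             while i < n and lines[i].startswith("    "):
--                 out.append(lines[i][4:])
--                 i += 1
--             out.append("```")
--         else:
--             out.append(line)
--             i += 1
--     return "\r\n".join(out) + "\r\n"
-- ===== Notes on version B (the rewrite author's own statement) =====
-- stated objective: alternative
-- what changed: Replaced the per-line boolean state-machine (previous/current in_block flags deciding among four emission cases) with an explicit index loop that, on a ' :::' line, emits the opening fence and runs an inner while-loop consuming the indented block lines before emitting the closing fence.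
import Mathlib
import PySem

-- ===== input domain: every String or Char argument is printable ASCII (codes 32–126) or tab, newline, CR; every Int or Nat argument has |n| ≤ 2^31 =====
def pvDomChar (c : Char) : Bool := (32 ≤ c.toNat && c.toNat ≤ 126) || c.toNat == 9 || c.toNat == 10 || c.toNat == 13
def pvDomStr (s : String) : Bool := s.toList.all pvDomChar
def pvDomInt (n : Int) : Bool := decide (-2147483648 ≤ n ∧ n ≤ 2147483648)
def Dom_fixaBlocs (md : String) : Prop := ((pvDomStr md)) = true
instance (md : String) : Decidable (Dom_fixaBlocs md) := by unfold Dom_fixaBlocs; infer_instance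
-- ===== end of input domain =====

-- B replaces A's boolean state-machine with an explicit outer loop plus an inner
-- loop that consumes an indented block; same cost, plainer control flow.

-- ===== PORT A =====
-- the body of A's for-loop, one line at a time over the state (in_block, new_md)
def aStep (st : Bool × List String) (line : String) : Bool × List String :=
  let previousInBlock := st.1
  let inBlock := st.1 || PySem.Str.startswith line "    :::"
  let inBlock := inBlock && PySem.Str.startswith line "    "
  let acc := st.2
  let acc := if inBlock && !previousInBlock then acc ++ ["```" ++ PySem.Str.slice line (some 7) none] else acc
  let acc := if inBlock && previousInBlock then acc ++ [PySem.Str.slice line (some 4) none] else acc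
  let acc := if previousInBlock && !inBlock then acc ++ ["```"] else acc
  let acc := if !inBlock then acc ++ [line] else acc
  (inBlock, acc)

def fixaBlocs (md : String) : String :=
  let md2 := PySem.Str.replace md "\r\n" "\n"
  -- split? is `some` whenever the separator is nonempty; getD only totalizes it
  let mdSplitted := (PySem.Str.split? md2 "\n").getD []
  let res := mdSplitted.foldl aStep (false, [])
  let newMd := if res.1 then res.2 ++ ["```"] else res.2
  PySem.Str.join "\r\n" newMd ++ "\r\n"

-- ===== PORT B =====
-- the inner while-loop of Source B: the emitted block lines and the remaining lines
def bConsume (ls : List String) : List String × List String :=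
  match ls with
  | [] => ([], [])
  | l :: rest =>
    if PySem.Str.startswith l "    " then
      let r := bConsume rest
      (PySem.Str.slice l (some 4) none :: r.1, r.2)
    else ([], l :: rest)

theorem bConsume_length_le (ls : List String) : (bConsume ls).2.length ≤ ls.length := by
  induction ls with
  | nil => simp [bConsume]
  | cons l rest ih =>
    simp only [bConsume]
    split
    · exact Nat.le_succ_of_le ih
    · simp

-- the outer while-loop of Source B
def bRun (ls : List String) : List String :=
  match ls with
  | [] => []
  | l :: rest =>
    if PySem.Str.startswith l "    :::" then
      let r := bConsume rest
      ("```" ++ PySem.Str.slice l (some 7) none) :: (r.1 ++ ["```"] ++ bRun r.2)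
    else l :: bRun rest
termination_by ls.length
decreasing_by
  · simp only [List.length_cons]
    exact Nat.lt_succ_of_le (bConsume_length_le rest)
  · simp

def fixaBlocs_alt (md : String) : String :=
  let lines := (PySem.Str.split? (PySem.Str.replace md "\r\n" "\n") "\n").getD []
  PySem.Str.join "\r\n" (bRun lines) ++ "\r\n"

-- ===== PRECONDITION & SPEC =====
def Spec_fixaBlocs (md : String) (out : String) : Prop := out = fixaBlocs_alt md
instance (md : String) (out : String) : Decidable (Spec_fixaBlocs md out) := by unfold Spec_fixaBlocs; infer_instance

-- ===== CLAIM (what is proved, stated in full; the proofs are below) =====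
def Claim_equal_fixaBlocs : Prop := ∀ (md : String), Dom_fixaBlocs md → Spec_fixaBlocs md (fixaBlocs md)

-- ===== LEMMAS AND PROOFS =====

-- a line starting with "    :::" also starts with "    "
theorem sw7_sw4 (l : String) (h : PySem.Str.startswith l "    :::" = true) :
    PySem.Str.startswith l "    " = true := by
  rw [PySem.Str.startswith_eq] at h ⊢
  rw [PySem.Chars.startswith_iff] at h ⊢
  exact List.IsPrefix.trans (by decide) h

-- A's trailing closing fence for a block still open at end of input
def finishA (st : Bool × List String) : List String :=
  if st.1 then st.2 ++ ["```"] else st.2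

theorem bRun_nil : bRun [] = [] := by
  rw [bRun]

-- the invariant tying A's fold to B's two loops, for both values of the flag
theorem main_inv (ls : List String) : ∀ acc : List String,
    (finishA (ls.foldl aStep (false, acc)) = acc ++ bRun ls) ∧
    (finishA (ls.foldl aStep (true, acc)) =
      acc ++ ((bConsume ls).1 ++ ["```"] ++ bRun (bConsume ls).2)) := by
  induction ls with
  | nil =>
    intro acc
    simp [finishA, bConsume, bRun_nil]
  | cons l rest ih =>
    intro acc
    constructor
    · by_cases h7 : PySem.Str.startswith l "    :::" = true
      · have h4 := sw7_sw4 l h7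
        simp only [List.foldl_cons, aStep, h7, h4, Bool.false_or,
          Bool.not_false, Bool.and_self, Bool.and_false, Bool.not_true, reduceIte]
        have h7' : PySem.Chars.startswith l.toList [' ', ' ', ' ', ' ', ':', ':', ':'] = true := by
          simpa using h7
        rw [(ih _).2, bRun]
        simp [h7']
      · simp only [Bool.not_eq_true] at h7
        simp only [List.foldl_cons, aStep, h7, Bool.false_or, Bool.false_and,
          Bool.and_false, Bool.not_false, reduceIte]
        have h7' : PySem.Chars.startswith l.toList [' ', ' ', ' ', ' ', ':', ':', ':'] = false := by
          simpa using h7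
        rw [(ih _).1, bRun]
        simp [h7']
    · by_cases h4 : PySem.Str.startswith l "    " = true
      · simp only [List.foldl_cons, aStep, h4, Bool.true_or,
          Bool.not_true, Bool.and_false, Bool.and_self, reduceIte]
        rw [(ih _).2]
        simp only [bConsume, h4, reduceIte]
        simp
      · have h7 : PySem.Str.startswith l "    :::" = false := by
          by_contra hc
          simp only [Bool.not_eq_false] at hc
          exact h4 (sw7_sw4 l hc)
        simp only [Bool.not_eq_true] at h4
        simp only [List.foldl_cons, aStep, h4, h7, Bool.true_or, Bool.and_false,
          Bool.not_false, Bool.and_true, Bool.not_true, reduceIte]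
        rw [(ih _).1]
        simp only [bConsume, h4, Bool.false_eq_true, reduceIte]
        have h7' : PySem.Chars.startswith l.toList [' ', ' ', ' ', ' ', ':', ':', ':'] = false := by
          simpa using h7
        rw [bRun]
        simp [h7']

-- ===== VERDICT (by name: the statement is the Claim_ definition above) =====
theorem fixaBlocs_spec : Claim_equal_fixaBlocs := by
  intro md _
  unfold Spec_fixaBlocs fixaBlocs fixaBlocs_alt
  have h := (main_inv ((PySem.Str.split? (PySem.Str.replace md "\r\n" "\n") "\n").getD []) []).1
  simp only [finishA, List.nil_append] at h
  simp only [h]
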